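-- pv_equiv track=rewrite | github.com/joeriben/ucdcae-ai-lab | devserver/my_app/routes/media_routes.py | _find_entity_by_type
-- ===== SOURCE A (Python) =====
-- def _find_entity_by_type(entities: list, media_type: str, latest: bool = True) -> dict:
--     """
--     Find entity in entities array by media type.
--
--     Args:
--         entities: List of entity records from metadata
--         media_type: Type to search for ('image', 'audio', 'video')
--         latest: If True (default), return the LATEST (last) entity. If False, return first.
--
--     Returns:
--         Entity dict or None
--     """
--     found = []
--
--     # Search for output_TYPE entities (e.g., output_image, output_audio)
--     for entity in entities:
--         entity_type = entity.get('type', '')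
--         if entity_type == f'output_{media_type}':
--             found.append(entity)
--
--     # Fallback: Search for just the type (legacy compatibility)
--     if not found:
--         for entity in entities:
--             if entity.get('type') == media_type:
--                 found.append(entity)
--
--     if not found:
--         return None
--
--     # Return latest (last) or first based on parameter
--     return found[-1] if latest else found[0]
-- ===== SOURCE B (Python) =====
-- def _find_entity_by_type(entities: list, media_type: str, latest: bool = True) -> dict:
--     """Single pass: track first/last primary (output_TYPE) and legacy (TYPE) matches."""
--     target = f'output_{media_type}'
--     first_p = last_p = first_l = last_l = None
--     for entity in entities:
--         t = entity.get('type')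
--         if (t if t is not None else '') == target:
--             if first_p is None:
--                 first_p = entity
--             last_p = entity
--         if t == media_type:
--             if first_l is None:
--                 first_l = entity
--             last_l = entity
--     if first_p is not None:
--         return last_p if latest else first_p
--     if first_l is not None:
--         return last_l if latest else first_l
--     return None
-- ===== Notes on version B (the rewrite author's own statement) =====
-- stated objective: alternative
-- what changed: Replaces A's two sequential collect-into-list passes plus end-indexing with a single pass over entities that maintains only first/last trackers for the primary output_{media_type} matches and for the legacy bare media_type matches, choosing primary over legacy after the loop.
import Mathlib
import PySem

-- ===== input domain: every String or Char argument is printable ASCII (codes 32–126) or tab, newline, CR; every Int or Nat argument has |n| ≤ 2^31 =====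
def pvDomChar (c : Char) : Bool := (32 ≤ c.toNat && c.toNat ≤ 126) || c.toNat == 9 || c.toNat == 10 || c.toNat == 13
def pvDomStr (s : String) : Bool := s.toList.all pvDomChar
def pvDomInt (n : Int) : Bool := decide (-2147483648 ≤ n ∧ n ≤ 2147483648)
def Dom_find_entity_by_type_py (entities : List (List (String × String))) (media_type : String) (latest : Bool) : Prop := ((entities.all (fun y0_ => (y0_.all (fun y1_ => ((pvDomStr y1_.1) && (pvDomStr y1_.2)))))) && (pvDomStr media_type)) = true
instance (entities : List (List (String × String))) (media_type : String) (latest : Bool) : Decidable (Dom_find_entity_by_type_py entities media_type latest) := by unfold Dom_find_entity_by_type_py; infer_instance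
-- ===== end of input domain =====

-- B replaces A's two collect-into-list passes with one pass keeping only first/last trackers
-- for primary (output_{media_type}) and legacy (media_type) matches: alternative decomposition, O(1) extra space.


-- shared helper: Python dict.get('type') on an association list (first match)
def pvGetType? (e : List (String × String)) : Option String :=
  (e.find? (fun p => p.1 == "type")).map (·.2)

-- ===== PORT A =====
-- two passes: collect primary matches; if none, collect legacy matches; index the list at -1 / 0
def find_entity_by_type_py (entities : List (List (String × String))) (media_type : String) (latest : Bool) : Option (List (String × String)) :=
  let found := entities.foldl
    (fun acc e => if ((pvGetType? e).getD "") == ("output_" ++ media_type) then acc ++ [e] else acc) []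
  let found := if found = [] then
      entities.foldl (fun acc e => if pvGetType? e == some media_type then acc ++ [e] else acc) []
    else found
  if found = [] then none
  else if latest then PySem.List.pyGet? found (-1) else PySem.List.pyGet? found 0

-- ===== PORT B =====
-- one pass with four trackers (first/last primary, first/last legacy)
def pvStepB (media_type : String)
    (s : Option (List (String × String)) × Option (List (String × String)) × Option (List (String × String)) × Option (List (String × String)))
    (e : List (String × String)) :
    Option (List (String × String)) × Option (List (String × String)) × Option (List (String × String)) × Option (List (String × String)) :=
  let t? := pvGetType? e
  let s := if t?.getD "" == ("output_" ++ media_type) then (s.1.or (some e), some e, s.2.2.1, s.2.2.2) else s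
  if t? == some media_type then (s.1, s.2.1, s.2.2.1.or (some e), some e) else s

def find_entity_by_type_py_alt (entities : List (List (String × String))) (media_type : String) (latest : Bool) : Option (List (String × String)) :=
  match entities.foldl (pvStepB media_type) (none, none, none, none) with
  | (some fp, lp, _, _) => if latest then lp else some fp
  | (none, _, some fl, ll) => if latest then ll else some fl
  | _ => none

-- ===== PRECONDITION & SPEC =====
def Spec_find_entity_by_type_py (entities : List (List (String × String))) (media_type : String) (latest : Bool) (out : Option (List (String × String))) : Prop := out = find_entity_by_type_py_alt entities media_type latest
instance (entities : List (List (String × String))) (media_type : String) (latest : Bool) (out : Option (List (String × String))) : Decidable (Spec_find_entity_by_type_py entities media_type latest out) := by unfold Spec_find_entity_by_type_py; infer_instance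

-- ===== CLAIM (what is proved, stated in full; the proofs are below) =====
def Claim_equal_find_entity_by_type_py : Prop := ∀ (entities : List (List (String × String))) (media_type : String) (latest : Bool), Dom_find_entity_by_type_py entities media_type latest → Spec_find_entity_by_type_py entities media_type latest (find_entity_by_type_py entities media_type latest)

-- ===== LEMMAS AND PROOFS =====

-- B's fold computes exactly the head?/getLast? endpoints of A's two accumulated lists
lemma pvB_inv (media_type : String) :
    ∀ (entities : List (List (String × String))) (fndP fndL : List (List (String × String))),
    entities.foldl (pvStepB media_type) (fndP.head?, fndP.getLast?, fndL.head?, fndL.getLast?)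
      = ((entities.foldl (fun acc e => if ((pvGetType? e).getD "") == ("output_" ++ media_type) then acc ++ [e] else acc) fndP).head?,
         (entities.foldl (fun acc e => if ((pvGetType? e).getD "") == ("output_" ++ media_type) then acc ++ [e] else acc) fndP).getLast?,
         (entities.foldl (fun acc e => if pvGetType? e == some media_type then acc ++ [e] else acc) fndL).head?,
         (entities.foldl (fun acc e => if pvGetType? e == some media_type then acc ++ [e] else acc) fndL).getLast?) := by
  intro entities
  induction entities with
  | nil => intro fndP fndL; rfl
  | cons e rest ih =>
    intro fndP fndL
    simp only [List.foldl_cons]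
    by_cases h1 : ((pvGetType? e).getD "") == ("output_" ++ media_type)
    · by_cases h2 : pvGetType? e == some media_type
      · have := ih (fndP ++ [e]) (fndL ++ [e])
        simp only [pvStepB, h1, h2, if_pos] at *
        simpa [List.getLast?_concat, List.head?_append, Option.or] using this
      · have := ih (fndP ++ [e]) fndL
        simp only [pvStepB, h1, h2] at *
        simpa [List.getLast?_concat, List.head?_append, Option.or] using this
    · by_cases h2 : pvGetType? e == some media_type
      · have := ih fndP (fndL ++ [e])
        simp only [pvStepB, h1, h2] at *
        simpa [List.getLast?_concat, List.head?_append, Option.or] using this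
      · have := ih fndP fndL
        simp only [pvStepB, h1, h2] at *
        simpa using this

-- after the loop: choosing from the endpoint trackers equals indexing A's chosen list
lemma pv_final (P L : List (List (String × String))) (latest : Bool) :
    (let found := if P = [] then L else P;
     if found = [] then none else if latest then PySem.List.pyGet? found (-1) else PySem.List.pyGet? found 0)
    = (match (P.head?, P.getLast?, L.head?, L.getLast?) with
       | (some fp, lp, _, _) => if latest then lp else some fp
       | (none, _, some fl, ll) => if latest then ll else some fl
       | _ => none) := by
  cases P with
  | nil =>
    cases L with
    | nil => simp
    | cons x xs => cases latest <;> simp [PySem.List.pyGet?, PySem.List.pyIdx?, List.getLast?_eq_getElem?]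
  | cons x xs => cases latest <;> simp [PySem.List.pyGet?, PySem.List.pyIdx?, List.getLast?_eq_getElem?]

-- ===== VERDICT (by name: the statement is the Claim_ definition above) =====
theorem find_entity_by_type_py_spec : Claim_equal_find_entity_by_type_py := by
  intro entities media_type latest _
  unfold Spec_find_entity_by_type_py find_entity_by_type_py find_entity_by_type_py_alt
  have hinv := pvB_inv media_type entities [] []
  simp only [List.head?_nil, List.getLast?_nil] at hinv
  rw [hinv]
  exact pv_final _ _ latest
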